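-- pv_equiv track=rewrite | github.com/JoshuaRVLS/jcode | src/python/features/editor_logic.py | should_auto_indent
-- ===== SOURCE A (Python) =====
-- def _trim_left(s):
--     return s.lstrip(" \t")
--
-- def _trim_right_ws(s):
--     return s.rstrip(" \t")
--
-- def _starts_with_keyword(line, keyword):
--     if not line.startswith(keyword):
--         return False
--     if len(line) == len(keyword):
--         return True
--     next_ch = line[len(keyword)]
--     return not (next_ch.isalnum() or next_ch == "_")
--
-- def should_auto_indent(line):
--     trimmed = _trim_left(line)
--     if not trimmed:
--         return False
--
--     trimmed = _trim_right_ws(trimmed)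
--     if not trimmed:
--         return False
--
--     comment_pos = trimmed.find("//")
--     if comment_pos != -1:
--         trimmed = _trim_right_ws(trimmed[:comment_pos])
--     if not trimmed:
--         return False
--
--     if trimmed[-1] in ("{", "[", "(", ":"):
--         return True
--
--     keywords = (
--         "if",
--         "for",
--         "while",
--         "else",
--         "def",
--         "class",
--         "switch",
--         "case",
--         "default",
--         "try",
--         "catch",
--         "do",
--         "finally",
--     )
--     for kw in keywords:
--         if _starts_with_keyword(trimmed, kw):
--             return True
--     return False
-- ===== SOURCE B (Python) =====
-- _KEYWORDS = frozenset((
--     "if", "for", "while", "else", "def", "class", "switch",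
--     "case", "default", "try", "catch", "do", "finally",
-- ))
--
-- def should_auto_indent(line):
--     # Cut the comment first (lstrip can never remove a '/', so the first "//"
--     # of the raw line is the same "//" A finds after trimming), then strip once.
--     code = line.partition("//")[0].strip(" \t")
--     if not code:
--         return False
--     if code[-1] in "{[(:":
--         return True
--     i = 0
--     while i < len(code) and (code[i].isalnum() or code[i] == "_"):
--         i += 1
--     return code[:i] in _KEYWORDS
-- ===== Notes on version B (the rewrite author's own statement) =====
-- stated objective: simpler
-- what changed: B cuts the line at the first comment marker before any trimming (a single partition plus one strip replaces A's lstrip/rstrip/find/slice/rstrip pipeline; correct since stripping only removes spaces and tabs, which can never contain or split the two-slash marker), and replaces A's 13 per-keyword prefix-plus-boundary tests by one index-based scan for the maximal leading identifier run followed by a single frozenset lookup.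
import Mathlib
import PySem

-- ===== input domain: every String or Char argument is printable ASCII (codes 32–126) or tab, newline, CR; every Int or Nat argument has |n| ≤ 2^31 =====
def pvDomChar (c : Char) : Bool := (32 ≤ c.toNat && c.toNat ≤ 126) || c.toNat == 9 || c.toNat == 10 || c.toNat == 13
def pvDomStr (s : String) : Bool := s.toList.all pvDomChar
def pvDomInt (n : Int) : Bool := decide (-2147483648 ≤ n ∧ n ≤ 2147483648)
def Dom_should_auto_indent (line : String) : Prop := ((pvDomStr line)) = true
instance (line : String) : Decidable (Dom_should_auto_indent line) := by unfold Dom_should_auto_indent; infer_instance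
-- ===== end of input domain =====

-- B cuts the comment first on the raw line and strips once, then replaces A's 13
-- keyword-prefix tests by one leading-identifier scan plus a set lookup (objective: simpler).

-- ===== PORT A =====
-- s.lstrip(" \t") / s.rstrip(" \t"): drop the leading / trailing run of ' ' and '\t' (exact)
def pvTrimLeft (s : List Char) : List Char := s.dropWhile (fun c => c == ' ' || c == '\t')
def pvTrimRight (s : List Char) : List Char := (s.reverse.dropWhile (fun c => c == ' ' || c == '\t')).reverse
-- ch.isalnum() or ch == "_"
def pvIsWord (c : Char) : Bool := PySem.Chars.isalnum c || c == '_'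

def pvStartsWithKeyword (line kw : List Char) : Bool :=
  if !(PySem.Chars.startswith line kw) then false
  else if line.length = kw.length then true
  else
    match PySem.List.pyGet? line (kw.length : Int) with
    | some c => !(pvIsWord c)
    | none => false  -- unreachable: kw is a strict prefix of line here

def pvKeywords : List (List Char) :=
  ["if".toList, "for".toList, "while".toList, "else".toList, "def".toList,
   "class".toList, "switch".toList, "case".toList, "default".toList,
   "try".toList, "catch".toList, "do".toList, "finally".toList]

def should_auto_indent (line : String) : Bool :=
  let trimmed := pvTrimLeft line.toList
  if trimmed.isEmpty then false else
  let trimmed := pvTrimRight trimmed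
  if trimmed.isEmpty then false else
  let commentPos := PySem.Chars.find trimmed ['/', '/']
  let trimmed := if commentPos ≠ -1 then pvTrimRight (PySem.List.slice trimmed none (some commentPos)) else trimmed
  if trimmed.isEmpty then false else
  if (match PySem.List.pyGet? trimmed (-1) with
      | some c => (['{', '[', '(', ':'] : List Char).contains c
      | none => false) then true
  else pvKeywords.any (fun kw => pvStartsWithKeyword trimmed kw)

-- ===== PORT B =====
def pvWsB (c : Char) : Bool := c == ' ' || c == '\t'

-- code.strip(" \t") of Source B, exact: drop the leading ws run, then the trailing one via reverse
def pvStripB (s : List Char) : List Char :=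
  ((s.dropWhile pvWsB).reverse.dropWhile pvWsB).reverse

-- the 'while i < len(code) and (code[i].isalnum() or code[i] == "_"): i += 1' loop of Source B:
-- length of the maximal leading identifier run
def pvTokenLen : List Char → Nat
  | [] => 0
  | c :: rest => if PySem.Chars.isalnum c || c == '_' then pvTokenLen rest + 1 else 0

def pvKeywordSet : PySem.Set (List Char) :=
  PySem.Set.ofList
    ["if".toList, "for".toList, "while".toList, "else".toList, "def".toList,
     "class".toList, "switch".toList, "case".toList, "default".toList,
     "try".toList, "catch".toList, "do".toList, "finally".toList]

def should_auto_indent_alt (line : String) : Bool :=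
  -- line.partition("//")[0]: everything before the first "//", the whole line if absent
  let cut := PySem.Chars.find line.toList ['/', '/']
  let code := pvStripB (if cut ≠ -1 then PySem.List.slice line.toList none (some cut) else line.toList)
  if code.isEmpty then false
  else if (match code.getLast? with        -- code[-1] on a nonempty string
           | some c => "{[(:".toList.contains c
           | none => false) then true
  else PySem.Set.contains pvKeywordSet (code.take (pvTokenLen code))

-- ===== PRECONDITION & SPEC =====
def Spec_should_auto_indent (line : String) (out : Bool) : Prop := out = should_auto_indent_alt line
instance (line : String) (out : Bool) : Decidable (Spec_should_auto_indent line out) := by unfold Spec_should_auto_indent; infer_instance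

-- ===== CLAIM (what is proved, stated in full; the proofs are below) =====
def Claim_equal_should_auto_indent : Prop := ∀ (line : String), Dom_should_auto_indent line → Spec_should_auto_indent line (should_auto_indent line)

-- ===== LEMMAS AND PROOFS =====

-- A's normalized string: lstrip, rstrip, cut at the "//" found in the trimmed string, rstrip again
def pvCoreA (l : List Char) : List Char :=
  if PySem.Chars.find (pvTrimRight (pvTrimLeft l)) ['/', '/'] ≠ -1 then
    pvTrimRight (PySem.List.slice (pvTrimRight (pvTrimLeft l)) none
      (some (PySem.Chars.find (pvTrimRight (pvTrimLeft l)) ['/', '/'])))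
  else pvTrimRight (pvTrimLeft l)

-- B's normalized string: cut at the "//" found in the raw line, then strip once
def pvCoreB (l : List Char) : List Char :=
  pvStripB (if PySem.Chars.find l ['/', '/'] ≠ -1 then
    PySem.List.slice l none (some (PySem.Chars.find l ['/', '/'])) else l)

theorem ws_not_slash {c : Char} (h : pvWsB c = true) : c ≠ '/' := by
  unfold pvWsB at h
  rcases Bool.or_eq_true_iff.mp h with h | h
  · simp_all
  · simp_all

theorem slash_infix_ws_prefix (pre m : List Char) (hpre : ∀ c ∈ pre, pvWsB c = true) :
    (['/', '/'] <:+: (pre ++ m)) ↔ (['/', '/'] <:+: m) := by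
  induction pre with
  | nil => simp
  | cons c pre ih =>
    have hc : pvWsB c = true := hpre c (by simp)
    rw [List.cons_append, List.infix_cons_iff, ih (fun x hx => hpre x (by simp [hx]))]
    constructor
    · rintro (hp | h)
      · obtain ⟨r, hr⟩ := hp
        simp only [List.cons_append, List.nil_append] at hr
        injection hr with hhd _
        exact absurd hhd.symm (ws_not_slash hc)
      · exact h
    · exact Or.inr

theorem slash_infix_ws (pre m suf : List Char)
    (hpre : ∀ c ∈ pre, pvWsB c = true) (hsuf : ∀ c ∈ suf, pvWsB c = true) :
    (['/', '/'] <:+: (pre ++ m ++ suf)) ↔ (['/', '/'] <:+: m) := by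
  rw [List.append_assoc, slash_infix_ws_prefix pre (m ++ suf) hpre]
  constructor
  · intro h
    rw [← List.reverse_infix] at h ⊢
    rw [List.reverse_append] at h
    have hrev : (['/', '/'] : List Char).reverse = ['/', '/'] := by decide
    rw [hrev] at h ⊢
    exact (slash_infix_ws_prefix suf.reverse m.reverse
      (fun c hc => hsuf c (List.mem_reverse.mp hc))).mp h
  · intro h
    exact h.trans (List.prefix_append m suf).isInfix

-- find = k from an occurrence at k and no occurrence earlier
theorem find_eq_of (l sub : List Char) (k : Nat)
    (h1 : sub <+: l.drop k) (h2 : ∀ i, i < k → ¬ sub <+: l.drop i) :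
    PySem.Chars.find l sub = (k : Int) := by
  have hinf : sub <:+: l := h1.isInfix.trans (List.drop_suffix k l).isInfix
  have hnn : 0 ≤ PySem.Chars.find l sub := (PySem.Chars.find_nonneg_iff _ _).mpr hinf
  obtain ⟨hp, hmin⟩ := PySem.Chars.find_spec hnn
  rcases Nat.lt_trichotomy (PySem.Chars.find l sub).toNat k with h | h | h
  · exact absurd hp (h2 _ h)
  · omega
  · exact absurd h1 (hmin k h)

theorem prefix_append_left {sub x y : List Char} (h : sub <+: x ++ y)
    (hlen : sub.length ≤ x.length) : sub <+: x := by
  rw [List.prefix_iff_eq_take] at h ⊢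
  rwa [List.take_append_of_le_length hlen] at h

theorem find_split (pre mid suf : List Char)
    (hpre : ∀ c ∈ pre, pvWsB c = true) (hsuf : ∀ c ∈ suf, pvWsB c = true) :
    PySem.Chars.find (pre ++ mid ++ suf) ['/', '/'] =
      (if PySem.Chars.find mid ['/', '/'] = -1 then -1
       else (pre.length : Int) + PySem.Chars.find mid ['/', '/']) := by
  by_cases hm : PySem.Chars.find mid ['/', '/'] = -1
  · rw [if_pos hm]
    rw [PySem.Chars.find_eq_neg_one_iff] at hm ⊢
    rwa [slash_infix_ws pre mid suf hpre hsuf]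
  · rw [if_neg hm]
    have hnn : 0 ≤ PySem.Chars.find mid ['/', '/'] := by
      have := PySem.Chars.neg_one_le_find mid ['/', '/']
      omega
    obtain ⟨hp, hmin⟩ := PySem.Chars.find_spec hnn
    set q : Nat := (PySem.Chars.find mid ['/', '/']).toNat with hqdef
    have hq : PySem.Chars.find mid ['/', '/'] = (q : Int) := by omega
    have hqlen : q + 2 ≤ mid.length := by
      have h1 := hp.length_le
      simp only [List.length_cons, List.length_nil, List.length_drop] at h1
      omega
    have hfind : PySem.Chars.find (pre ++ mid ++ suf) ['/', '/'] = ((pre.length + q : Nat) : Int) := by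
      apply find_eq_of
      · have hdrop : (pre ++ mid ++ suf).drop (pre.length + q) = mid.drop q ++ suf := by
          rw [List.append_assoc, List.drop_append (l₁ := pre),
              List.drop_eq_nil_of_le (by omega : pre.length ≤ pre.length + q), List.nil_append,
              (by omega : pre.length + q - pre.length = q),
              List.drop_append (l₁ := mid), (by omega : q - mid.length = 0), List.drop_zero]
        rw [hdrop]
        exact hp.trans (List.prefix_append _ _)
      · intro i hi hcontra
        by_cases hilt : i < pre.length
        · have hdrop : (pre ++ mid ++ suf).drop i = pre[i] :: (pre.drop (i + 1) ++ (mid ++ suf)) := by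
            rw [List.append_assoc, List.drop_append (l₁ := pre),
                (by omega : i - pre.length = 0), List.drop_zero,
                List.drop_eq_getElem_cons hilt, List.cons_append]
          rw [hdrop] at hcontra
          obtain ⟨r, hr⟩ := hcontra
          simp only [List.cons_append, List.nil_append] at hr
          injection hr with hhd _
          exact absurd hhd.symm (ws_not_slash (hpre _ (List.getElem_mem hilt)))
        · have hdrop : (pre ++ mid ++ suf).drop i = mid.drop (i - pre.length) ++ suf := by
            rw [List.append_assoc, List.drop_append (l₁ := pre),
                List.drop_eq_nil_of_le (by omega : pre.length ≤ i), List.nil_append,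
                List.drop_append (l₁ := mid), (by omega : i - pre.length - mid.length = 0),
                List.drop_zero]
          rw [hdrop] at hcontra
          refine hmin (i - pre.length) (by omega) (prefix_append_left hcontra ?_)
          simp only [List.length_cons, List.length_nil, List.length_drop]
          omega
    rw [hfind, hq]
    push_cast
    ring

theorem core_eq (l : List Char) : pvCoreB l = pvCoreA l := by
  have hfun : (fun c : Char => c == ' ' || c == '\t') = pvWsB := rfl
  have h1 : l.takeWhile pvWsB ++ l.dropWhile pvWsB = l := List.takeWhile_append_dropWhile
  have h2 : ((l.dropWhile pvWsB).reverse.dropWhile pvWsB).reverse ++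
      ((l.dropWhile pvWsB).reverse.takeWhile pvWsB).reverse = l.dropWhile pvWsB := by
    rw [← List.reverse_append, List.takeWhile_append_dropWhile, List.reverse_reverse]
  have hpre_ws : ∀ c ∈ l.takeWhile pvWsB, pvWsB c = true := fun c hc => List.mem_takeWhile_imp hc
  have hsuf_ws : ∀ c ∈ ((l.dropWhile pvWsB).reverse.takeWhile pvWsB).reverse, pvWsB c = true :=
    fun c hc => List.mem_takeWhile_imp (List.mem_reverse.mp hc)
  have hT2 : pvTrimRight (pvTrimLeft l) = ((l.dropWhile pvWsB).reverse.dropWhile pvWsB).reverse := rfl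
  have hfind : PySem.Chars.find l ['/', '/'] =
      (if PySem.Chars.find (((l.dropWhile pvWsB).reverse.dropWhile pvWsB).reverse) ['/', '/'] = -1
       then -1
       else ((l.takeWhile pvWsB).length : Int) +
         PySem.Chars.find (((l.dropWhile pvWsB).reverse.dropWhile pvWsB).reverse) ['/', '/']) := by
    conv_lhs => rw [← h1, ← h2, ← List.append_assoc]
    exact find_split _ _ _ hpre_ws hsuf_ws
  unfold pvCoreA pvCoreB
  rw [hT2]
  by_cases hm : PySem.Chars.find (((l.dropWhile pvWsB).reverse.dropWhile pvWsB).reverse) ['/', '/'] = -1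
  · rw [hfind, if_pos hm, if_neg (by simp), if_neg (by simp [hm])]
    rfl
  · -- a real occurrence: both sides cut at the same place
    have hnn : 0 ≤ PySem.Chars.find (((l.dropWhile pvWsB).reverse.dropWhile pvWsB).reverse) ['/', '/'] := by
      have := PySem.Chars.neg_one_le_find (((l.dropWhile pvWsB).reverse.dropWhile pvWsB).reverse) ['/', '/']
      omega
    obtain ⟨hp, _⟩ := PySem.Chars.find_spec hnn
    set q : Nat := (PySem.Chars.find (((l.dropWhile pvWsB).reverse.dropWhile pvWsB).reverse) ['/', '/']).toNat with hqdef
    have hq : PySem.Chars.find (((l.dropWhile pvWsB).reverse.dropWhile pvWsB).reverse) ['/', '/'] = (q : Int) := by omega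
    have hqlen : q + 2 ≤ (((l.dropWhile pvWsB).reverse.dropWhile pvWsB).reverse).length := by
      have hl1 := hp.length_le
      simp only [List.length_cons, List.length_nil, List.length_drop] at hl1
      omega
    have hcond : PySem.Chars.find l ['/', '/'] = (((l.takeWhile pvWsB).length + q : Nat) : Int) := by
      rw [hfind, if_neg hm, hq]
      push_cast
      ring
    rw [hcond, if_pos (show (((l.takeWhile pvWsB).length + q : Nat) : Int) ≠ -1 by omega),
        if_pos hm, hq, PySem.List.slice_to_natCast, PySem.List.slice_to_natCast]
    have htake : l.take ((l.takeWhile pvWsB).length + q) =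
        l.takeWhile pvWsB ++ (((l.dropWhile pvWsB).reverse.dropWhile pvWsB).reverse).take q := by
      have h1' : l.take ((l.takeWhile pvWsB).length + q)
          = (l.takeWhile pvWsB ++ l.dropWhile pvWsB).take ((l.takeWhile pvWsB).length + q) := by
        rw [h1]
      rw [h1', List.take_append,
          List.take_of_length_le (by omega : (l.takeWhile pvWsB).length ≤ (l.takeWhile pvWsB).length + q),
          (by omega : (l.takeWhile pvWsB).length + q - (l.takeWhile pvWsB).length = q)]
      conv_lhs => rw [← h2]
      rw [List.take_append_of_le_length (by omega : q ≤ (((l.dropWhile pvWsB).reverse.dropWhile pvWsB).reverse).length)]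
    rw [htake]
    -- strip of (all-ws prefix ++ cut piece) is rstrip of the cut piece
    have hdw : (l.takeWhile pvWsB ++ (((l.dropWhile pvWsB).reverse.dropWhile pvWsB).reverse).take q).dropWhile pvWsB
        = (((l.dropWhile pvWsB).reverse.dropWhile pvWsB).reverse).take q := by
      rw [List.dropWhile_append]
      have hnilpre : (l.takeWhile pvWsB).dropWhile pvWsB = [] :=
        List.dropWhile_eq_nil_iff.mpr hpre_ws
      rw [hnilpre]
      simp only [List.isEmpty_nil, if_true]
      rcases Nat.eq_zero_or_pos q with hq0 | hq0
      · rw [hq0]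
        simp
      · rcases hT2c : ((l.dropWhile pvWsB).reverse.dropWhile pvWsB).reverse with _ | ⟨c, r⟩
        · rw [hT2c] at hqlen
          simp at hqlen
        · have hT1c : l.dropWhile pvWsB = c :: (r ++ ((l.dropWhile pvWsB).reverse.takeWhile pvWsB).reverse) := by
            conv_lhs => rw [← h2]
            rw [hT2c, List.cons_append]
          have hT1ne : l.dropWhile pvWsB ≠ [] := by rw [hT1c]; simp
          have hhead := List.head_dropWhile_not pvWsB hT1ne
          have e1 : (l.dropWhile pvWsB).head? = some c := by rw [hT1c]; rfl
          have e2 : (l.dropWhile pvWsB).head? = some ((l.dropWhile pvWsB).head hT1ne) :=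
            List.head?_eq_some_head _
          have hhd : (l.dropWhile pvWsB).head hT1ne = c := Option.some.inj (e2.symm.trans e1)
          have hc : pvWsB c = false := hhd ▸ hhead
          obtain ⟨q', hq'⟩ : ∃ q', q = q' + 1 := ⟨q - 1, by omega⟩
          rw [hq', List.take_succ_cons, List.dropWhile_cons_of_neg (by simp [hc])]
    unfold pvStripB pvTrimRight
    rw [hfun, hdw]
  
-- the index-bounded while loop of Source B collects exactly the maximal pvIsWord-run
theorem tokenLen_take (l : List Char) : l.take (pvTokenLen l) = l.takeWhile pvIsWord := by
  induction l with
  | nil => rfl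
  | cons c rest ih =>
    have hw : pvIsWord c = (PySem.Chars.isalnum c || c == '_') := rfl
    by_cases hc : (PySem.Chars.isalnum c || c == '_') = true
    · simp [pvTokenLen, hc, hw, ih]
    · simp [pvTokenLen, hc, hw]

theorem swk_eq_takeWhile (t kw : List Char) (hkw : kw.all pvIsWord = true) :
    pvStartsWithKeyword t kw = (t.takeWhile pvIsWord == kw) := by
  unfold pvStartsWithKeyword
  by_cases h : kw <+: t
  · obtain ⟨r, rfl⟩ := h
    have hsw : PySem.Chars.startswith (kw ++ r) kw = true :=
      (PySem.Chars.startswith_iff _ _).mpr ⟨r, rfl⟩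
    have hkwself : kw.takeWhile pvIsWord = kw :=
      List.takeWhile_eq_self_iff.mpr (by simpa [List.all_eq_true] using hkw)
    have htw : (kw ++ r).takeWhile pvIsWord = kw ++ r.takeWhile pvIsWord := by
      simp [List.takeWhile_append, hkwself]
    cases r with
    | nil =>
      simp only [List.append_nil] at hsw htw ⊢
      simp [hsw, hkwself]
    | cons c r' =>
      rw [PySem.List.pyGet?_append_length kw r' c]
      simp only [hsw, Bool.not_true, Bool.false_eq_true, if_false, htw]
      rw [if_neg (by simp)]
      by_cases hc : pvIsWord c = true
      · simp [hc]
      · simp [hc]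
  · have hsw : PySem.Chars.startswith t kw = false := by
      rw [← Bool.not_eq_true]
      intro hc
      exact h ((PySem.Chars.startswith_iff _ _).mp hc)
    have htw : ¬ (t.takeWhile pvIsWord = kw) := by
      intro e
      apply h
      rw [← e]
      exact List.takeWhile_prefix _
    simp [hsw, htw]

theorem anyKw_eq (t : List Char) :
    pvKeywords.any (fun kw => pvStartsWithKeyword t kw)
      = PySem.Set.contains pvKeywordSet (t.take (pvTokenLen t)) := by
  rw [tokenLen_take]
  unfold pvKeywords
  simp only [List.any_cons, List.any_nil]
  rw [swk_eq_takeWhile t "if".toList (by decide), swk_eq_takeWhile t "for".toList (by decide),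
      swk_eq_takeWhile t "while".toList (by decide), swk_eq_takeWhile t "else".toList (by decide),
      swk_eq_takeWhile t "def".toList (by decide), swk_eq_takeWhile t "class".toList (by decide),
      swk_eq_takeWhile t "switch".toList (by decide), swk_eq_takeWhile t "case".toList (by decide),
      swk_eq_takeWhile t "default".toList (by decide), swk_eq_takeWhile t "try".toList (by decide),
      swk_eq_takeWhile t "catch".toList (by decide), swk_eq_takeWhile t "do".toList (by decide),
      swk_eq_takeWhile t "finally".toList (by decide)]
  have hset : pvKeywordSet = ["if".toList, "for".toList, "while".toList, "else".toList,
      "def".toList, "class".toList, "switch".toList, "case".toList, "default".toList,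
      "try".toList, "catch".toList, "do".toList, "finally".toList] := by decide
  rw [hset]
  simp only [PySem.Set.contains_eq_listContains, List.contains_cons, List.contains_nil]

theorem bracket_chars : "{[(:".toList = ['{', '[', '(', ':'] := by decide

theorem find_nil_neg_one : PySem.Chars.find ([] : List Char) ['/', '/'] = -1 := by
  rw [PySem.Chars.find_eq_neg_one_iff]
  intro h
  have := h.length_le
  simp at this

theorem coreA_nil_of_trim (l : List Char) (h : pvTrimRight (pvTrimLeft l) = []) :
    pvCoreA l = [] := by
  unfold pvCoreA
  rw [h, find_nil_neg_one]
  simp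

-- ===== VERDICT (by name: the statement is the Claim_ definition above) =====
theorem should_auto_indent_spec : Claim_equal_should_auto_indent := by
  unfold Claim_equal_should_auto_indent
  intro line _
  unfold Spec_should_auto_indent
  have hA : should_auto_indent line =
      (if (pvTrimLeft line.toList).isEmpty then false
       else if (pvTrimRight (pvTrimLeft line.toList)).isEmpty then false
       else if (pvCoreA line.toList).isEmpty then false
       else if (match PySem.List.pyGet? (pvCoreA line.toList) (-1) with
                | some c => (['{', '[', '(', ':'] : List Char).contains c
                | none => false) then true
       else pvKeywords.any (fun kw => pvStartsWithKeyword (pvCoreA line.toList) kw)) := rfl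
  have hB : should_auto_indent_alt line =
      (if (pvCoreB line.toList).isEmpty then false
       else if (match (pvCoreB line.toList).getLast? with
                | some c => "{[(:".toList.contains c
                | none => false) then true
       else PySem.Set.contains pvKeywordSet
         ((pvCoreB line.toList).take (pvTokenLen (pvCoreB line.toList)))) := rfl
  rw [hA, hB, core_eq line.toList, PySem.List.pyGet?_neg_one, bracket_chars, anyKw_eq]
  by_cases e1 : (pvTrimLeft line.toList).isEmpty
  · rw [if_pos e1]
    have hA0 : pvCoreA line.toList = [] := by
      apply coreA_nil_of_trim
      rw [List.isEmpty_iff.mp e1]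
      rfl
    rw [hA0]
    simp
  · rw [if_neg e1]
    by_cases e2 : (pvTrimRight (pvTrimLeft line.toList)).isEmpty
    · rw [if_pos e2]
      rw [coreA_nil_of_trim line.toList (List.isEmpty_iff.mp e2)]
      simp
    · rw [if_neg e2]
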